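-- pv_equiv track=rewrite | github.com/oashtari/cs-module-project-hash-tables | applications/histo/histo.py | convert
-- ===== SOURCE A (Python) =====
-- def convert(sntnc):
--     if sntnc == '':
--         return sntnc
--
--     sntnc = sntnc.strip()
--     sntnc = sntnc.replace('\n', ' ')
--     sntnc = sntnc.replace('\r', ' ')
--     sntnc = sntnc.replace('\t', ' ')
--
--     to_ignore = r'":;,.-+=/\\|[]{}()*^&'
--
--     new_sntnc = ''
--     for char in sntnc:
--         if char not in to_ignore:
--             new_sntnc += char
--
--     return new_sntnc.split()
-- ===== SOURCE B (Python) =====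
-- IGNORE = frozenset(r'":;,.-+=/\\|[]{}()*^&')
--
-- def convert(sntnc):
--     if sntnc == '':
--         return sntnc
--     words = []
--     cur = []
--     for c in sntnc:
--         if c.isspace():
--             if cur:
--                 words.append(''.join(cur))
--                 cur = []
--         elif c not in IGNORE:
--             cur.append(c)
--     if cur:
--         words.append(''.join(cur))
--     return words
-- ===== Notes on version B (the rewrite author's own statement) =====
-- stated objective: alternative
-- what changed: B is a single-pass state machine over the characters (current-word buffer + emitted-words list, flushed at whitespace and at the end), replacing A's staged pipeline of strip, three replace passes, a filter pass and a final split.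
-- outside the precondition, e.g. on convert(''): A returns '', B returns ''
import Mathlib
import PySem

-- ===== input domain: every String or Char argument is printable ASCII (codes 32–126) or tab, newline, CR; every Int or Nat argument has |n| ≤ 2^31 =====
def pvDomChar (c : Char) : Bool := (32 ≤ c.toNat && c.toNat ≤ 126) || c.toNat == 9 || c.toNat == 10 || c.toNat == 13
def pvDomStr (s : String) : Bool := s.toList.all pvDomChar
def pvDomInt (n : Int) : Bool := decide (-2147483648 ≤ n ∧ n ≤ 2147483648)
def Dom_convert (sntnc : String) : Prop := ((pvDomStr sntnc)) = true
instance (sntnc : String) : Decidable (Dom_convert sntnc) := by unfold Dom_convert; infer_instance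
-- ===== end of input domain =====

-- B is a single-pass state machine (word buffer + emitted list, flushed at whitespace/end)
-- replacing A's staged strip/replace/filter/split pipeline; alternative decomposition, same cost.


-- ===== PORT A =====
-- to_ignore = r'":;,.-+=/\\|[]{}()*^&'  (the raw string contains the backslash twice; kept literally)
def toIgnoreA : List Char := ['"', ':', ';', ',', '.', '-', '+', '=', '/', '\\', '\\', '|', '[', ']', '{', '}', '(', ')', '*', '^', '&']

def convert (sntnc : String) : List String :=
  if sntnc = "" then []   -- Python returns the STRING '' here (not a list); this input is excluded by Pre_convert
  else
    let s1 := PySem.Str.strip sntnc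
    let s2 := PySem.Str.replace s1 "\n" " "
    let s3 := PySem.Str.replace s2 "\r" " "
    let s4 := PySem.Str.replace s3 "\t" " "
    -- for char in sntnc: if char not in to_ignore: new_sntnc += char  ('c in <str>' for a single char is char membership)
    let newChars := s4.toList.foldl (fun acc c => if toIgnoreA.contains c then acc else acc ++ [c]) []
    PySem.Str.split₀ (String.ofList newChars)

-- ===== PORT B =====
-- IGNORE = frozenset(r'":;,.-+=/\\|[]{}()*^&')
def ignoreB : PySem.Set Char :=
  PySem.Set.ofList ['"', ':', ';', ',', '.', '-', '+', '=', '/', '\\', '\\', '|', '[', ']', '{', '}', '(', ')', '*', '^', '&']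

-- one pass: state = (emitted words, current-word buffer); flush the buffer at whitespace and at the end
def convert_alt (sntnc : String) : List String :=
  if sntnc = "" then []   -- same guard as A (Python returns the string '' there); excluded by Pre_convert
  else
    let st := sntnc.toList.foldl
      (fun (st : List String × List Char) c =>
        if PySem.Chars.isspace c then
          if st.2.isEmpty then st else (st.1 ++ [String.ofList st.2], [])
        else if ignoreB.contains c then st
        else (st.1, st.2 ++ [c]))
      ([], [])
    if st.2.isEmpty then st.1 else st.1 ++ [String.ofList st.2]

-- ===== PRECONDITION & SPEC =====
-- Pre_ excludes only the empty string, on which Python A (and B, which keeps the same guard) returns the STRING '' — not a value of the declared list type.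
def Pre_convert (sntnc : String) : Prop := sntnc ≠ ""
instance (sntnc : String) : Decidable (Pre_convert sntnc) := by unfold Pre_convert; infer_instance
def pvWitness_convert : String := "a b."
def Spec_convert (sntnc : String) (out : List String) : Prop := out = convert_alt sntnc
instance (sntnc : String) (out : List String) : Decidable (Spec_convert sntnc out) := by unfold Spec_convert; infer_instance

-- ===== CLAIM (what is proved, stated in full; the proofs are below) =====
def Claim_equal_convert : Prop := ∀ (sntnc : String), Dom_convert sntnc → Pre_convert sntnc → Spec_convert sntnc (convert sntnc)

-- ===== LEMMAS AND PROOFS =====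

-- wordsAux: accumulator-free view of PySem.Chars.split₀.go
def pvWordsAux : List Char → List Char → List (List Char)
  | [], cur => if cur.isEmpty then [] else [cur.reverse]
  | c :: rest, cur =>
      if PySem.Chars.isspace c then
        (if cur.isEmpty then pvWordsAux rest [] else cur.reverse :: pvWordsAux rest [])
      else pvWordsAux rest (c :: cur)

theorem go_eq (s : List Char) : ∀ cur acc, PySem.Chars.split₀.go s cur acc = acc.reverse ++ pvWordsAux s cur := by
  induction s with
  | nil => intro cur acc; simp [PySem.Chars.split₀.go, pvWordsAux]; split <;> simp
  | cons c rest ih =>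
      intro cur acc
      simp only [PySem.Chars.split₀.go, pvWordsAux]
      split
      · split
        · exact ih [] acc
        · rw [ih [] (cur.reverse :: acc)]; simp
      · exact ih (c :: cur) acc

theorem split₀_eq_wordsAux (s : List Char) : PySem.Chars.split₀ s = pvWordsAux s [] := by
  simpa using go_eq s [] []

theorem wordsAux_allspace (t : List Char) (ht : ∀ c ∈ t, PySem.Chars.isspace c) :
    ∀ cur, pvWordsAux t cur = if cur.isEmpty then [] else [cur.reverse] := by
  induction t with
  | nil => intro cur; rfl
  | cons c rest ih =>
      intro cur
      have hc : PySem.Chars.isspace c := ht c (by simp)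
      have hrest : ∀ c ∈ rest, PySem.Chars.isspace c := fun x hx => ht x (by simp [hx])
      simp only [pvWordsAux, hc, if_pos]
      rw [ih hrest]
      split <;> simp

theorem wordsAux_append_space (u t : List Char) (ht : ∀ c ∈ t, PySem.Chars.isspace c) :
    ∀ cur, pvWordsAux (u ++ t) cur = pvWordsAux u cur := by
  induction u with
  | nil =>
      intro cur
      simp only [List.nil_append]
      rw [wordsAux_allspace t ht cur]; rfl
  | cons c rest ih =>
      intro cur
      simp only [List.cons_append, pvWordsAux]
      split
      · split <;> rw [ih]
      · rw [ih]

theorem wordsAux_dropWhile (s : List Char) :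
    pvWordsAux (s.dropWhile PySem.Chars.isspace) [] = pvWordsAux s [] := by
  induction s with
  | nil => rfl
  | cons c rest ih =>
      by_cases hc : PySem.Chars.isspace c
      · rw [List.dropWhile_cons_of_pos hc, ih]
        simp [pvWordsAux, hc]
      · rw [List.dropWhile_cons_of_neg hc]

theorem wordsAux_strip (s : List Char) :
    pvWordsAux (PySem.Chars.strip s) [] = pvWordsAux s [] := by
  have h1 : pvWordsAux (PySem.Chars.lstrip s) [] = pvWordsAux s [] := wordsAux_dropWhile s
  have h2 : PySem.Chars.strip s = PySem.Chars.rstrip (PySem.Chars.lstrip s) := rfl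
  rw [h2]
  set u := PySem.Chars.lstrip s with hu
  have hsplit : u = PySem.Chars.rstrip u ++ (u.reverse.takeWhile PySem.Chars.isspace).reverse := by
    simp [PySem.Chars.rstrip]
    rw [← List.reverse_append, List.takeWhile_append_dropWhile, List.reverse_reverse]
  have htail : ∀ c ∈ (u.reverse.takeWhile PySem.Chars.isspace).reverse, PySem.Chars.isspace c := by
    intro c hc
    exact List.mem_takeWhile_imp (by simpa using hc)
  calc pvWordsAux (PySem.Chars.rstrip u) []
      = pvWordsAux (PySem.Chars.rstrip u ++ (u.reverse.takeWhile PySem.Chars.isspace).reverse) [] :=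
        (wordsAux_append_space _ _ htail []).symm
    _ = pvWordsAux u [] := by rw [← hsplit]
    _ = pvWordsAux s [] := h1

-- single-char replace is map
theorem replace_go_singleton (o n : Char) :
    ∀ (l : List Char) (fuel : Nat) (acc : List Char), l.length ≤ fuel →
      PySem.Chars.replace.go [o] [n] fuel l acc =
        acc.reverse ++ l.map (fun c => if c = o then n else c) := by
  intro l
  induction l with
  | nil => intro fuel acc _; cases fuel <;> simp [PySem.Chars.replace.go]
  | cons c t ih =>
      intro fuel acc hf
      cases fuel with
      | zero => simp at hf
      | succ fuel =>
          simp only [PySem.Chars.replace.go]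
          by_cases h : c = o
          · subst h
            have : List.isPrefixOf [c] (c :: t) = true := by simp [List.isPrefixOf]
            rw [if_pos this]
            simp only [List.length_cons, List.length_nil, List.drop_succ_cons, List.drop_zero]
            simp only [List.length_cons] at hf
            rw [ih fuel _ (by omega)]
            simp
          · have : List.isPrefixOf [o] (c :: t) = false := by
              simp [List.isPrefixOf]; exact fun hh => (h hh.symm).elim
            rw [if_neg (by simp [this])]
            simp only [List.length_cons] at hf
            rw [ih fuel _ (by omega)]
            simp [h]

theorem replace_singleton (s : List Char) (o n : Char) :
    PySem.Chars.replace s [o] [n] = s.map (fun c => if c = o then n else c) := by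
  simp only [PySem.Chars.replace, List.isEmpty_cons, Bool.false_eq_true, if_false]
  exact replace_go_singleton o n s s.length [] (le_refl _)

-- a whitespace-to-whitespace, identity-on-nonspace map does not change the word list
theorem wordsAux_map (f : Char → Char)
    (hsp : ∀ c, PySem.Chars.isspace (f c) = PySem.Chars.isspace c)
    (hid : ∀ c, PySem.Chars.isspace c = false → f c = c) (s : List Char) :
    ∀ cur, pvWordsAux (s.map f) cur = pvWordsAux s cur := by
  induction s with
  | nil => intro cur; rfl
  | cons c rest ih =>
      intro cur
      simp only [List.map_cons, pvWordsAux, hsp c]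
      by_cases hc : PySem.Chars.isspace c
      · rw [if_pos hc, if_pos hc]; split <;> rw [ih]
      · rw [if_neg hc, if_neg hc, hid c (by simpa using hc), ih]

-- the key commutation: filter chars (keeping all whitespace) vs split-then-clean-then-drop-empties
theorem wordsAux_filter (keep : Char → Bool) (hk : ∀ c, PySem.Chars.isspace c → keep c) (s : List Char) :
    ∀ cur, pvWordsAux (s.filter keep) (cur.filter keep) =
      ((pvWordsAux s cur).map (·.filter keep)).filter (fun w => !w.isEmpty) := by
  induction s with
  | nil =>
      intro cur
      simp only [List.filter_nil, pvWordsAux]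
      by_cases hc : cur.isEmpty
      · simp_all [List.isEmpty_iff]
      · rw [if_neg hc]
        by_cases hfc : (cur.filter keep).isEmpty
        · simp_all [List.isEmpty_iff, List.filter_reverse]
        · simp_all [List.isEmpty_iff, List.filter_reverse]
  | cons c rest ih =>
      intro cur
      by_cases hc : PySem.Chars.isspace c
      · have hkc : keep c = true := hk c hc
        rw [List.filter_cons_of_pos hkc]
        simp only [pvWordsAux, hc, if_pos]
        by_cases hce : cur.isEmpty
        · have : cur = [] := by simpa [List.isEmpty_iff] using hce
          subst this
          simpa using ih []
        · rw [if_neg hce]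
          have hih := ih []
          simp only [List.filter_nil] at hih
          by_cases hfe : (cur.filter keep).isEmpty
          · rw [if_pos hfe, hih]
            simp only [List.isEmpty_iff] at hfe
            simp [List.filter_reverse, hfe]
          · rw [if_neg hfe, hih]
            simp only [List.isEmpty_iff] at hfe
            simp [List.filter_reverse, hfe]
      · simp only [pvWordsAux, hc, Bool.false_eq_true]
        by_cases hkc : keep c
        · rw [List.filter_cons_of_pos hkc]
          simp only [pvWordsAux, hc, Bool.false_eq_true]
          have := ih (c :: cur)
          rw [List.filter_cons_of_pos hkc] at this
          exact this
        · rw [List.filter_cons_of_neg (by simpa using hkc)]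
          have := ih (c :: cur)
          rw [List.filter_cons_of_neg (by simpa using hkc)] at this
          exact this

-- both ignore tests are the same predicate
theorem keep_eq (c : Char) : ignoreB.contains c = toIgnoreA.contains c := by
  rw [Bool.eq_iff_iff]
  simp [ignoreB, toIgnoreA, PySem.Set.contains, List.contains_eq_mem, PySem.Set.mem_ofList]

-- no ignored char is whitespace
theorem keepA_space (c : Char) (hc : PySem.Chars.isspace c) : (!(toIgnoreA.contains c)) = true := by
  simp only [Bool.not_eq_true', List.contains_eq_mem, decide_eq_false_iff_not]
  intro hm
  fin_cases hm <;> exact absurd hc (by decide)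

theorem foldl_if_filter (q : Char → Bool) (l : List Char) :
    l.foldl (fun acc c => if q c then acc else acc ++ [c]) [] = l.filter (fun c => !(q c)) := by
  have hfun : (fun (acc : List Char) c => if q c then acc else acc ++ [c])
      = (fun (acc : List Char) c => if (!(q c)) = true then acc ++ [id c] else acc) := by
    funext acc c
    cases h : q c <;> simp
  rw [hfun, PySem.List.foldl_append_if]
  simp

-- Chars-level form of A's result
theorem convertA_chars (s : String) (h : ¬ s = "") :
    convert s = (((pvWordsAux s.toList []).map (·.filter (fun c => !(toIgnoreA.contains c)))).filter
        (fun w => !w.isEmpty)).map String.ofList := by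
  unfold convert
  rw [if_neg h]
  simp only [foldl_if_filter]
  have hmapsf : ∀ (o : Char) (t : String), (PySem.Str.replace t (String.ofList [o]) " ").toList
      = t.toList.map (fun c => if c = o then ' ' else c) := by
    intro o t
    rw [PySem.Str.toList_replace]
    simp only [String.toList_ofList]
    rw [show (" " : String).toList = [' '] from rfl]
    exact replace_singleton _ o ' '
  have hnl : ("\n" : String) = String.ofList ['\n'] := rfl
  have hcr : ("\r" : String) = String.ofList ['\r'] := rfl
  have htb : ("\t" : String) = String.ofList ['\t'] := rfl
  simp only [PySem.Str.split₀]
  rw [String.toList_ofList, htb, hmapsf, hcr, hmapsf, hnl, hmapsf, PySem.Str.toList_strip]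
  have hwf : ∀ X : List Char, pvWordsAux (X.filter (fun c => !(toIgnoreA.contains c))) []
      = ((pvWordsAux X []).map (·.filter (fun c => !(toIgnoreA.contains c)))).filter (fun w => !w.isEmpty) := by
    intro X
    simpa using wordsAux_filter _ keepA_space X []
  rw [split₀_eq_wordsAux, hwf]
  congr 1
  rw [wordsAux_map _
        (by intro c
            by_cases h : c = '\t'
            · subst h; decide
            · rw [if_neg h])
        (by intro c hc
            rw [if_neg]
            rintro rfl
            exact absurd hc (by decide))]
  rw [wordsAux_map _
        (by intro c
            by_cases h : c = '\r'
            · subst h; decide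
            · rw [if_neg h])
        (by intro c hc
            rw [if_neg]
            rintro rfl
            exact absurd hc (by decide))]
  rw [wordsAux_map _
        (by intro c
            by_cases h : c = '\n'
            · subst h; decide
            · rw [if_neg h])
        (by intro c hc
            rw [if_neg]
            rintro rfl
            exact absurd hc (by decide))]
  rw [wordsAux_strip]

-- accumulator-free view of B's one-pass scan
def pvScan : List Char → List Char → List (List Char)
  | [], cur => if cur.isEmpty then [] else [cur]
  | c :: rest, cur =>
      if PySem.Chars.isspace c then
        (if cur.isEmpty then pvScan rest [] else cur :: pvScan rest [])
      else if toIgnoreA.contains c then pvScan rest cur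
      else pvScan rest (cur ++ [c])

-- named forms of B's loop step and final flush (proof-only helpers)
def pvStepB (st : List String × List Char) (c : Char) : List String × List Char :=
  if PySem.Chars.isspace c then
    if st.2.isEmpty then st else (st.1 ++ [String.ofList st.2], [])
  else if ignoreB.contains c then st
  else (st.1, st.2 ++ [c])

def pvFlushB (st : List String × List Char) : List String :=
  if st.2.isEmpty then st.1 else st.1 ++ [String.ofList st.2]

-- B's foldl + final flush computes pvScan
theorem foldB_eq (s : List Char) : ∀ (ws : List String) (cur : List Char),
    pvFlushB (s.foldl pvStepB (ws, cur)) = ws ++ (pvScan s cur).map String.ofList := by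
  induction s with
  | nil =>
      intro ws cur
      simp only [List.foldl_nil, pvScan, pvFlushB]
      by_cases hc : cur.isEmpty <;> simp [hc]
  | cons c rest ih =>
      intro ws cur
      simp only [List.foldl_cons, pvScan]
      rw [show pvStepB (ws, cur) c
            = if PySem.Chars.isspace c then
                (if cur.isEmpty then (ws, cur) else (ws ++ [String.ofList cur], ([] : List Char)))
              else if toIgnoreA.contains c then (ws, cur) else (ws, cur ++ [c]) by
        simp only [pvStepB]; rw [keep_eq]]
      by_cases hs : PySem.Chars.isspace c
      · simp only [hs, if_pos]
        by_cases hc : cur.isEmpty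
        · have : cur = [] := by simpa [List.isEmpty_iff] using hc
          subst this
          simp only [hc, if_pos]
          exact ih ws []
        · simp only [hc, Bool.false_eq_true, if_false]
          rw [ih (ws ++ [String.ofList cur]) []]
          simp
      · simp only [hs, Bool.false_eq_true, if_false]
        by_cases hg : toIgnoreA.contains c
        · simp only [hg, if_pos]; exact ih ws cur
        · simp only [hg, Bool.false_eq_true, if_false]; exact ih ws (cur ++ [c])

-- pvScan is wordsAux on the punctuation-filtered string (buffer stored forward vs reversed)
theorem pvScan_eq_wordsAux (s : List Char) : ∀ cur,
    pvScan s cur = pvWordsAux (s.filter (fun c => !(toIgnoreA.contains c))) cur.reverse := by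
  induction s with
  | nil =>
      intro cur
      simp only [List.filter_nil, pvScan, pvWordsAux, List.isEmpty_reverse, List.reverse_reverse]
  | cons c rest ih =>
      intro cur
      simp only [List.filter_cons]
      by_cases hs : PySem.Chars.isspace c
      · simp only [keepA_space c hs, if_pos]
        simp only [pvScan, pvWordsAux, hs, if_pos, List.isEmpty_reverse, List.reverse_reverse]
        by_cases hc : cur.isEmpty
        · simp only [hc, if_pos]; simpa using ih []
        · simp only [hc, Bool.false_eq_true, if_false]
          rw [ih []]; rfl
      · simp only [pvScan, hs, Bool.false_eq_true, if_false]
        by_cases hg : toIgnoreA.contains c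
        · simp only [hg, Bool.not_true, Bool.false_eq_true, if_false, if_pos, ih cur]
        · simp only [hg, Bool.not_false, if_true, Bool.false_eq_true, if_false]
          simp only [pvWordsAux, hs, Bool.false_eq_true, if_false]
          rw [ih (cur ++ [c])]
          simp

-- Chars-level form of B's result
theorem convertB_chars (s : String) (h : ¬ s = "") :
    convert_alt s = (((pvWordsAux s.toList []).map (·.filter (fun c => !(toIgnoreA.contains c)))).filter
        (fun w => !w.isEmpty)).map String.ofList := by
  unfold convert_alt
  rw [if_neg h]
  -- the let-bound fold + final `if` is definitionally pvFlushB of a foldl over pvStepB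
  show pvFlushB (s.toList.foldl pvStepB ([], [])) = _
  rw [foldB_eq s.toList [] []]
  rw [pvScan_eq_wordsAux]
  simp only [List.reverse_nil, List.nil_append]
  congr 1
  simpa using wordsAux_filter _ keepA_space s.toList []

-- ===== VERDICT (by name: the statement is the Claim_ definition above) =====
theorem convert_spec : Claim_equal_convert := by
  intro s _ hpre
  unfold Spec_convert
  rw [convertA_chars s hpre, convertB_chars s hpre]
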